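-- pv_equiv track=rewrite | github.com/softal55/InsureGuard-AI | ml-service-python/main.py | format_feature_name
-- ===== SOURCE A (Python) =====
-- def _title_segs(segs: list[str]) -> str:
--     tiny = frozenset({"of", "and", "or", "by", "for", "to", "in", "per", "as", "vs"})
--     tokens: list[str] = []
--     for p in segs:
--         tokens.extend(str(p).replace("-", " ").split())
--     parts: list[str] = []
--     for p in tokens:
--         low = p.lower()
--         if low in tiny:
--             parts.append(low)
--         elif len(p) <= 2:
--             parts.append(p.upper())
--         elif low == "zip":
--             parts.append(p.upper())
--         else:
--             parts.append(p.capitalize())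
--     return " ".join(parts)
--
-- def format_feature_name(name: str) -> str:
--     """Turn encoded column names into short human-facing labels."""
--     segs = name.split("_")
--     if not segs:
--         return name
--     tail = segs[-1].upper()
--     if tail in ("YES", "NO"):
--         base = "_".join(segs[:-1])
--         if not base:
--             return tail
--         return f"{format_feature_name(base)} ({tail})"
--     return _title_segs(segs)
-- ===== SOURCE B (Python) =====
-- def _label_word(w: str) -> str:
--     tiny = frozenset({"of", "and", "or", "by", "for", "to", "in", "per", "as", "vs"})
--     low = w.lower()
--     if low in tiny:
--         return low
--     if len(w) <= 2 or low == "zip":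
--         return w.upper()
--     return w.capitalize()
--
--
-- def format_feature_name(name: str) -> str:
--     """Turn encoded column names into short human-facing labels (iterative peel, no recursion)."""
--     segs = name.split("_")
--     tails: list[str] = []
--     while segs[-1].upper() in ("YES", "NO") and "_".join(segs[:-1]):
--         tails.append(segs.pop().upper())
--     if segs[-1].upper() in ("YES", "NO"):
--         base = segs[-1].upper()
--     else:
--         base = " ".join(_label_word(w) for s in segs for w in s.replace("-", " ").split())
--     return base + "".join(f" ({t})" for t in reversed(tails))
-- ===== Notes on version B (the rewrite author's own statement) =====
-- stated objective: simpler
-- what changed: Replaces A's string-rebuilding recursion (re-join and re-split the base on every level) with a single iterative peel of trailing YES/NO segments collected into a tails list, and replaces the two-accumulator-loop title builder with a flat comprehension over words; same results, no recursion.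
import Mathlib
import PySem

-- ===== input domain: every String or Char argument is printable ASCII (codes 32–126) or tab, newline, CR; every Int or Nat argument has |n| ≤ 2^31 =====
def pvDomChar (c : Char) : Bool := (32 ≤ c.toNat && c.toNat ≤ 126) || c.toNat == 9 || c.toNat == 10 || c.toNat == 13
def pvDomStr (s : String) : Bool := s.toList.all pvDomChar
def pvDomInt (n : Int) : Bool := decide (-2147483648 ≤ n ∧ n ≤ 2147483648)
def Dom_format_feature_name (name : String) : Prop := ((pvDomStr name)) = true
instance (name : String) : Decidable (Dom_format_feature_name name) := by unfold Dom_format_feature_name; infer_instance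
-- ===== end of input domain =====

-- B replaces A's recursion with a single iterative peel of trailing YES/NO segments plus a
-- flat comprehension-style title builder (objective: simpler; same asymptotic cost).

-- ===== PORT A =====
-- structural description of Python's str.split("_") (single-char separator), used by the
-- termination lemma pv_base_lt the recursive port cites; proved equal to PySem.Chars.splitOn below
def pvSplitP : List Char → List Char × List (List Char)
  | [] => ([], [])
  | c :: rest =>
    let q := pvSplitP rest
    if c = '_' then ([], q.1 :: q.2) else (c :: q.1, q.2)

theorem pvSplitOn_go_eq (fuel : Nat) (l cur : List Char) (acc : List (List Char))
    (h : l.length < fuel) :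
    PySem.Chars.splitOn.go ['_'] fuel l cur acc =
      acc.reverse ++ ((cur.reverse ++ (pvSplitP l).1) :: (pvSplitP l).2) := by
  induction fuel generalizing l cur acc with
  | zero => omega
  | succ f ih =>
    cases l with
    | nil =>
      rw [PySem.Chars.splitOn.go.eq_def]
      simp [pvSplitP]
    | cons c rest =>
      rw [PySem.Chars.splitOn.go.eq_def]
      simp only [List.isPrefixOf, List.length_cons] at *
      rcases eq_or_ne c '_' with hc | hc
      · subst hc
        simp only [BEq.rfl, Bool.true_and, if_true, List.length_nil,
          List.drop_succ_cons, List.drop_zero]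
        rw [ih rest [] (cur.reverse :: acc) (by omega)]
        simp [pvSplitP]
      · have hcond : (('_' == c) && true) = false := by
          simp [Ne.symm hc]
        rw [hcond]
        simp only [Bool.false_eq_true, if_false]
        rw [ih rest (c :: cur) acc (by omega)]
        simp [pvSplitP, hc]

theorem pvSplitOn_eq (cs : List Char) :
    PySem.Chars.splitOn cs ['_'] = (pvSplitP cs).1 :: (pvSplitP cs).2 := by
  unfold PySem.Chars.splitOn
  rw [pvSplitOn_go_eq cs.length.succ cs [] [] (by omega)]
  simp

theorem pvJoin_splitP (cs : List Char) :
    PySem.Chars.join ['_'] ((pvSplitP cs).1 :: (pvSplitP cs).2) = cs := by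
  induction cs with
  | nil => simp [pvSplitP, PySem.Chars.join_singleton]
  | cons c rest ih =>
    rcases eq_or_ne c '_' with hc | hc
    · subst hc
      have hsp : pvSplitP ('_' :: rest) = ([], (pvSplitP rest).1 :: (pvSplitP rest).2) := by
        simp [pvSplitP]
      rw [hsp, PySem.Chars.join_cons_cons]
      simpa using ih
    · have hsp : pvSplitP (c :: rest) = (c :: (pvSplitP rest).1, (pvSplitP rest).2) := by
        simp [pvSplitP, hc]
      rw [hsp]
      cases h : (pvSplitP rest).2 with
      | nil =>
        rw [h] at ih
        simp only [PySem.Chars.join_singleton] at ih ⊢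
        simp [ih]
      | cons b t =>
        rw [h] at ih
        rw [PySem.Chars.join_cons_cons] at ih ⊢
        conv_rhs => rw [← ih]
        simp

theorem pvJoin_append_last (ls : List (List Char)) (a : List Char) (h : ls ≠ []) :
    PySem.Chars.join ['_'] (ls ++ [a]) = PySem.Chars.join ['_'] ls ++ '_' :: a := by
  induction ls with
  | nil => exact absurd rfl h
  | cons b t ih =>
    cases t with
    | nil => simp [PySem.Chars.join_cons_cons, PySem.Chars.join_singleton]
    | cons b' t' =>
      have h1 := ih (by simp)
      simp only [List.cons_append] at h1 ⊢
      rw [PySem.Chars.join_cons_cons, PySem.Chars.join_cons_cons, h1]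
      simp

-- termination lemma for the recursive port: the rejoined base is strictly shorter than name
theorem pv_base_lt (name : String)
    (h : PySem.Str.join "_" (((PySem.Chars.splitOn name.toList ['_']).map String.ofList).dropLast) ≠ "") :
    (PySem.Str.join "_" (((PySem.Chars.splitOn name.toList ['_']).map String.ofList).dropLast)).toList.length
      < name.toList.length := by
  rw [pvSplitOn_eq] at *
  set L := pvSplitP name.toList with hL
  have hjoin : (PySem.Str.join "_" (((L.1 :: L.2).map String.ofList).dropLast)).toList
      = PySem.Chars.join ['_'] ((L.1 :: L.2).dropLast) := by
    simp [PySem.Str.join, PySem.Chars.join, String.toList_ofList, List.map_dropLast,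
      Function.comp_def]
  cases hD : (L.1 :: L.2).dropLast with
  | nil =>
    exfalso
    apply h
    apply String.toList_inj.mp
    rw [hjoin, hD]
    exact PySem.Chars.join_nil _
  | cons b t =>
    have hlast : (L.1 :: L.2) = (b :: t) ++ [(L.1 :: L.2).getLast (by simp)] := by
      rw [← hD]; exact (List.dropLast_append_getLast (by simp)).symm
    have hname : name.toList = PySem.Chars.join ['_'] (L.1 :: L.2) := (pvJoin_splitP _).symm
    rw [hjoin, hD, hname, hlast, pvJoin_append_last _ _ (by simp)]
    simp

-- port of _title_segs
def pyCapitalize (s : String) : String :=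
  -- hand port of Python str.capitalize (exact on ASCII): first char upper-cased, rest lower-cased
  match s.toList with
  | [] => ""
  | c :: t => String.ofList (PySem.Chars.upperChar c :: PySem.Chars.lower t)

def titleSegs (segs : List String) : String :=
  let tiny : List String := ["of", "and", "or", "by", "for", "to", "in", "per", "as", "vs"]
  let tokens : List String := segs.foldl
    (fun acc p => acc ++ (PySem.Chars.split₀ (PySem.Chars.replace p.toList ['-'] [' '])).map String.ofList) []
  let parts : List String := tokens.foldl
    (fun acc p =>
      let low := PySem.Str.lower p
      if low ∈ tiny then acc ++ [low]
      else if PySem.Str.len p ≤ 2 then acc ++ [PySem.Str.upper p]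
      else if low = "zip" then acc ++ [PySem.Str.upper p]
      else acc ++ [pyCapitalize p]) []
  PySem.Str.join " " parts

def format_feature_name (name : String) : String :=
  let segs : List String := (PySem.Chars.splitOn name.toList ['_']).map String.ofList
  if hs : segs = [] then name
  else
    let tl := PySem.Str.upper (segs.getLast hs)
    if tl = "YES" ∨ tl = "NO" then
      let base := PySem.Str.join "_" segs.dropLast
      if hb : base = "" then tl
      else format_feature_name base ++ " (" ++ tl ++ ")"
    else titleSegs segs
termination_by name.toList.length
decreasing_by exact pv_base_lt name hb

-- ===== PORT B =====
def pvLabelWord (w : String) : String :=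
  let tiny : List String := ["of", "and", "or", "by", "for", "to", "in", "per", "as", "vs"]
  let low := PySem.Str.lower w
  if low ∈ tiny then low
  else if PySem.Str.len w ≤ 2 ∨ low = "zip" then PySem.Str.upper w
  else pyCapitalize w

-- the while loop: peel trailing YES/NO segments while the remaining join is non-empty;
-- returns (remaining segments, peeled uppercase tails in pop order)
def pvPeel : List String → List String × List String
  | [] => ([], [])  -- unreachable: the loop only runs on non-empty segment lists
  | s :: rest =>
    let tl := PySem.Str.upper ((s :: rest).getLast (by simp))
    if (tl = "YES" ∨ tl = "NO") ∧ PySem.Str.join "_" (s :: rest).dropLast ≠ "" then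
      let p := pvPeel (s :: rest).dropLast
      (p.1, tl :: p.2)
    else (s :: rest, [])
termination_by l => l.length
decreasing_by simp

def format_feature_name_alt (name : String) : String :=
  let segs : List String := (PySem.Chars.splitOn name.toList ['_']).map String.ofList
  let p := pvPeel segs
  let base : String :=
    match p.1 with
    | [] => ""  -- unreachable: pvPeel keeps the list non-empty
    | s :: rest =>
      let tl := PySem.Str.upper ((s :: rest).getLast (by simp))
      if tl = "YES" ∨ tl = "NO" then tl
      else
        PySem.Str.join " "
          (((s :: rest).flatMap
              (fun seg => (PySem.Chars.split₀ (PySem.Chars.replace seg.toList ['-'] [' '])).map String.ofList)).map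
            pvLabelWord)
  base ++ PySem.Str.join "" (p.2.reverse.map (fun t => " (" ++ t ++ ")"))

-- ===== PRECONDITION & SPEC =====
def Spec_format_feature_name (name : String) (out : String) : Prop := out = format_feature_name_alt name
instance (name : String) (out : String) : Decidable (Spec_format_feature_name name out) := by unfold Spec_format_feature_name; infer_instance

-- ===== CLAIM (what is proved, stated in full; the proofs are below) =====
def Claim_equal_format_feature_name : Prop := ∀ (name : String), Dom_format_feature_name name → Spec_format_feature_name name (format_feature_name name)

-- ===== LEMMAS AND PROOFS =====

theorem pvSplitP_no_underscore (cs : List Char) :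
    '_' ∉ (pvSplitP cs).1 ∧ ∀ l ∈ (pvSplitP cs).2, '_' ∉ l := by
  induction cs with
  | nil => simp [pvSplitP]
  | cons c rest ih =>
    rcases eq_or_ne c '_' with hc | hc
    · subst hc
      have hsp : pvSplitP ('_' :: rest) = ([], (pvSplitP rest).1 :: (pvSplitP rest).2) := by
        simp [pvSplitP]
      rw [hsp]
      refine ⟨by simp, ?_⟩
      intro l hl
      rcases List.mem_cons.mp hl with h | h
      · exact h ▸ ih.1
      · exact ih.2 l h
    · have hsp : pvSplitP (c :: rest) = (c :: (pvSplitP rest).1, (pvSplitP rest).2) := by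
        simp [pvSplitP, hc]
      rw [hsp]
      refine ⟨?_, ih.2⟩
      intro hm
      rcases List.mem_cons.mp hm with h | h
      · exact hc h.symm
      · exact ih.1 h

theorem pvSplitP_of_join : ∀ (ls : List (List Char)) (a : List Char),
    '_' ∉ a → (∀ l ∈ ls, '_' ∉ l) →
    pvSplitP (PySem.Chars.join ['_'] (a :: ls)) = (a, ls) := by
  intro ls
  induction ls with
  | nil =>
    intro a ha _
    rw [PySem.Chars.join_singleton]
    induction a with
    | nil => simp [pvSplitP]
    | cons c a' iha =>
      have hc : c ≠ '_' := fun e => ha (e ▸ List.mem_cons_self ..)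
      have h' := iha (fun hm => ha (List.mem_cons_of_mem _ hm))
      simp [pvSplitP, hc, h']
  | cons b ls' ih =>
    intro a ha hls
    have hb : '_' ∉ b := hls b (List.mem_cons_self ..)
    have hls' : ∀ l ∈ ls', '_' ∉ l := fun l hl => hls l (List.mem_cons_of_mem _ hl)
    rw [PySem.Chars.join_cons_cons]
    induction a with
    | nil =>
      simp only [List.nil_append, List.singleton_append]
      simp [pvSplitP, ih b hb hls']
    | cons c a' iha =>
      have hc : c ≠ '_' := fun e => ha (e ▸ List.mem_cons_self ..)
      have h' := iha (fun hm => ha (List.mem_cons_of_mem _ hm))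
      simp only [List.append_assoc, List.singleton_append] at h'
      simp only [List.cons_append]
      simp [pvSplitP, hc, h']

theorem pvChars_join_empty (ls : List (List Char)) :
    PySem.Chars.join [] ls = ls.flatten := by
  induction ls with
  | nil => exact PySem.Chars.join_nil _
  | cons b t ih =>
    cases t with
    | nil => simp [PySem.Chars.join_singleton]
    | cons b' t' =>
      rw [PySem.Chars.join_cons_cons]
      simp [ih]

theorem pvJoin_empty_append (xs : List String) (y : String) :
    PySem.Str.join "" (xs ++ [y]) = PySem.Str.join "" xs ++ y := by
  apply String.toList_inj.mp
  simp [PySem.Str.join, pvChars_join_empty]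

theorem pvTitle_eq (segs : List String) :
    titleSegs segs =
      PySem.Str.join " "
        ((segs.flatMap
            (fun seg => (PySem.Chars.split₀ (PySem.Chars.replace seg.toList ['-'] [' '])).map String.ofList)).map
          pvLabelWord) := by
  simp only [titleSegs]
  rw [PySem.List.foldl_append_eq_flatMap, List.nil_append]
  rw [PySem.List.foldl_congr_mem _ _ (fun acc p => acc ++ [pvLabelWord p]) []
    (by
      intro acc x _
      simp only [pvLabelWord]
      split_ifs <;> tauto)]
  rw [PySem.List.foldl_append_singleton_eq_map, List.nil_append]

theorem pv_step (name : String)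
    (hrec : ∀ base : String, base.toList.length < name.toList.length →
      format_feature_name base = format_feature_name_alt base) :
    format_feature_name name = format_feature_name_alt name := by
  rw [format_feature_name]
  unfold format_feature_name_alt
  rw [pvSplitOn_eq]
  simp only [List.map_cons]
  rw [dif_neg (by simp : ¬ (String.ofList (pvSplitP name.toList).1 ::
      List.map String.ofList (pvSplitP name.toList).2) = [])]
  rw [pvPeel]
  by_cases hC : (PySem.Str.upper ((String.ofList (pvSplitP name.toList).1 ::
        List.map String.ofList (pvSplitP name.toList).2).getLast (by simp)) = "YES" ∨
      PySem.Str.upper ((String.ofList (pvSplitP name.toList).1 ::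
        List.map String.ofList (pvSplitP name.toList).2).getLast (by simp)) = "NO") ∧
      PySem.Str.join "_" (String.ofList (pvSplitP name.toList).1 ::
        List.map String.ofList (pvSplitP name.toList).2).dropLast ≠ ""
  · rw [if_pos hC, if_pos hC.1, dif_neg hC.2]
    simp only []
    -- facts about the base string
    have hjoin : (PySem.Str.join "_" (String.ofList (pvSplitP name.toList).1 ::
        List.map String.ofList (pvSplitP name.toList).2).dropLast).toList
        = PySem.Chars.join ['_'] ((pvSplitP name.toList).1 :: (pvSplitP name.toList).2).dropLast := by
      simp [PySem.Str.join, String.toList_ofList, List.map_dropLast, Function.comp_def,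
        ← List.map_cons]
    have hlt : (PySem.Str.join "_" (String.ofList (pvSplitP name.toList).1 ::
        List.map String.ofList (pvSplitP name.toList).2).dropLast).toList.length
        < name.toList.length := by
      have h2 := pv_base_lt name (by rw [pvSplitOn_eq, List.map_cons]; exact hC.2)
      rw [pvSplitOn_eq, List.map_cons] at h2
      exact h2
    rw [hrec _ hlt]
    cases hD : ((pvSplitP name.toList).1 :: (pvSplitP name.toList).2).dropLast with
    | nil =>
      exfalso
      apply hC.2
      apply String.toList_inj.mp
      rw [hjoin, hD]
      exact PySem.Chars.join_nil _
    | cons d ds =>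
      have hmem : '_' ∉ d ∧ ∀ l ∈ ds, '_' ∉ l := by
        have hno := pvSplitP_no_underscore name.toList
        have hsub : ∀ l ∈ d :: ds, '_' ∉ l := by
          intro l hl
          have hmem2 : l ∈ (pvSplitP name.toList).1 :: (pvSplitP name.toList).2 :=
            (hD ▸ List.dropLast_sublist _).mem hl
          rcases List.mem_cons.mp hmem2 with h | h
          · exact h ▸ hno.1
          · exact hno.2 l h
        exact ⟨hsub d (List.mem_cons_self ..), fun l hl => hsub l (List.mem_cons_of_mem _ hl)⟩
      have hsplit : PySem.Chars.splitOn (PySem.Str.join "_" (String.ofList (pvSplitP name.toList).1 ::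
          List.map String.ofList (pvSplitP name.toList).2).dropLast).toList ['_'] = d :: ds := by
        rw [pvSplitOn_eq, hjoin, hD, pvSplitP_of_join ds d hmem.1 hmem.2]
      -- unfold B at base and align its segment list with segs.dropLast
      unfold format_feature_name_alt
      rw [hsplit]
      have hmapd : List.map String.ofList (d :: ds)
          = (String.ofList (pvSplitP name.toList).1 ::
              List.map String.ofList (pvSplitP name.toList).2).dropLast := by
        rw [← hD, ← List.map_cons, List.map_dropLast]
      rw [hmapd]
      simp only [List.reverse_cons, List.map_append, List.map_cons, List.map_nil,
        pvJoin_empty_append]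
      apply String.toList_inj.mp
      simp [String.toList_append]
  · rw [if_neg hC]
    simp only []
    by_cases hYN : PySem.Str.upper ((String.ofList (pvSplitP name.toList).1 ::
        List.map String.ofList (pvSplitP name.toList).2).getLast (by simp)) = "YES" ∨
        PySem.Str.upper ((String.ofList (pvSplitP name.toList).1 ::
        List.map String.ofList (pvSplitP name.toList).2).getLast (by simp)) = "NO"
    · have hb : PySem.Str.join "_" (String.ofList (pvSplitP name.toList).1 ::
          List.map String.ofList (pvSplitP name.toList).2).dropLast = "" := by
        by_contra h
        exact hC ⟨hYN, h⟩
      rw [if_pos hYN, if_pos hYN, dif_pos hb]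
      simp only [List.reverse_nil, List.map_nil]
      rw [show PySem.Str.join "" ([] : List String) = "" from rfl, String.append_empty]
    · rw [if_neg hYN, if_neg hYN, pvTitle_eq]
      simp only [List.reverse_nil, List.map_nil]
      rw [show PySem.Str.join "" ([] : List String) = "" from rfl, String.append_empty]

theorem pv_main (n : Nat) : ∀ (name : String), name.toList.length ≤ n →
    format_feature_name name = format_feature_name_alt name := by
  induction n with
  | zero =>
    intro name h
    exact pv_step name (fun base hlt => absurd hlt (by omega))
  | succ n ih =>
    intro name h
    exact pv_step name (fun base hlt => ih base (by omega))

-- ===== VERDICT (by name: the statement is the Claim_ definition above) =====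
theorem format_feature_name_spec : Claim_equal_format_feature_name := by
  intro name _
  unfold Spec_format_feature_name
  exact pv_main name.toList.length name le_rfl
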